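-- pv_equiv track=rewrite | github.com/ShowLo/LeetCode_code | python/problem1505-2.py | minInteger
-- ===== SOURCE A (Python) =====
-- def minInteger(num: str, k: int) -> str:
--     n = len(num)
--     digits = [str(i) for i in range(10)]
--     # 线段树上0代表未被换到前面去，1代表被换了
--     # 所以getSum得到的就是当前位置前面被换过了的数量
--     # 等价于未处理字符串的开头位置
--     segmentTree = SegmentTree(n)
--     # 记录0~9各个数字的位置
--     position = [[] for _ in range(10)]
--     for i in range(n - 1, -1, -1):
--         position[int(num[i])].append(i)
--     res = []
--     i = 0
--     while i < n:
--         digit = int(num[i])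
--         if not position[digit] or position[digit][-1] > i:
--             # 已经被交换过的了，忽略掉
--             i += 1
--             continue
--         for j in range(digit + 1):
--             if not position[j]:
--                 continue
--             # 在num中的索引
--             originIdx = position[j][-1]
--             # 找到一个比num[i]小的了，但还需要看距离是否够
--             count = segmentTree.getSum(originIdx + 1)
--             # 实际需要多少次的交换
--             needCount = originIdx - count
--             if needCount <= k:
--                 k -= needCount
--                 position[j].pop()
--                 res.append(str(j))
--                 segmentTree.update(originIdx + 1, 1)
--                 break
--     return ''.join(res)
--
-- class SegmentTree:
--     def __init__(self, n):
--         self.n = n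
--         self.tree = [0] * (n + 1)
--
--     def lowbit(self, x):
--         return x & (-x)
--
--     def update(self, i, x):
--         while i <= self.n:
--             self.tree[i] += x
--             i += self.lowbit(i)
--
--     def getSum(self, i):
--         res = 0
--         while i > 0:
--             res += self.tree[i]
--             i -= self.lowbit(i)
--         return res
-- ===== SOURCE B (Python) =====
-- def minInteger(num: str, k: int) -> str:
--     # Greedy over a shrinking list of digit values: each step take the leftmost
--     # smallest digit reachable within k adjacent swaps (its current index),
--     # pay its index in swaps, pop it.  int(c) raises on non-digit characters.
--     digits = [int(c) for c in num]
--     res = []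
--     while digits:
--         limit = min(k, len(digits) - 1)
--         best = 0
--         for idx in range(1, limit + 1):
--             if digits[idx] < digits[best]:
--                 best = idx
--         k -= best
--         res.append(digits.pop(best))
--     return ''.join(str(d) for d in res)
-- ===== Notes on version B (the rewrite author's own statement) =====
-- stated objective: simpler
-- what changed: Replaced the Fenwick (binary indexed) tree plus ten per-digit position stacks and the skip-scan over original indices by a direct greedy over a shrinking list of digit values: each step scans the first min(k, len-1)+1 remaining digits for the leftmost smallest one, pays its current index in swaps and pops it.
import Mathlib
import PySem

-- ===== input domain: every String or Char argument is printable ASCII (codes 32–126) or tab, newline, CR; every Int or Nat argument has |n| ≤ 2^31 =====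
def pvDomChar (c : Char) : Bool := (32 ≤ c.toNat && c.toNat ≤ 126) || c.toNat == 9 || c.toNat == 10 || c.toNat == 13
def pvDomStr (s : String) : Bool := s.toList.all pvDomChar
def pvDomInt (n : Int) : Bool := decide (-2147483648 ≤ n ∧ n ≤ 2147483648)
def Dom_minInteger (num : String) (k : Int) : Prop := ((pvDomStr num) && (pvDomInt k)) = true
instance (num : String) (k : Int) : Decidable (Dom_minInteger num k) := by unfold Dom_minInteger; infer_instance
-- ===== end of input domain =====

-- B replaces A's Fenwick tree and per-digit position stacks by a direct bounded scan
-- over a shrinking list of the remaining digit values (objective: simpler).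

-- ===== PORT A =====

-- int(num[i]) : Pre_ guarantees the char is an ASCII digit
def digitAt (cs : List Char) (i : Nat) : Nat := (cs.getD i '0').toNat - 48
-- str(j) for j in 0..9
def digitToChar (j : Nat) : Char :=
  match j with
  | 0 => '0' | 1 => '1' | 2 => '2' | 3 => '3' | 4 => '4'
  | 5 => '5' | 6 => '6' | 7 => '7' | 8 => '8' | _ => '9'

-- x & (-x) written over Nat (equal for x ≥ 0)
def lowbit (x : Nat) : Nat := x - (x &&& (x - 1))

theorem lowbit_pos {x : Nat} (h : 0 < x) : 0 < lowbit x := by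
  have h1 : x &&& (x - 1) ≤ x - 1 := Nat.and_le_right
  unfold lowbit; omega

def getSumLoop (tree : List Int) (i : Nat) (res : Int) : Int :=
  if h : 0 < i then getSumLoop tree (i - lowbit i) (res + tree.getD i 0) else res
termination_by i
decreasing_by have := lowbit_pos h; omega

def updateLoop (n : Nat) (tree : List Int) (i : Nat) (x : Int) (fuel : Nat) : List Int :=
  match fuel with
  | 0 => tree
  | fuel + 1 =>
    if i ≤ n then updateLoop n (tree.set i (tree.getD i 0 + x)) (i + lowbit i) x fuel
    else tree

-- for j in range(digit+1): … break  — returns (j, originIdx, needCount) of the break iteration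
def findSel (tree : List Int) (position : List (List Nat)) (k : Int) (digit : Nat)
    (j : Nat) : Option (Nat × Nat × Int) :=
  if j ≤ digit then
    match (position.getD j []).getLast? with
    | none => findSel tree position k digit (j + 1)
    | some originIdx =>
      let count := getSumLoop tree (originIdx + 1) 0
      let needCount := (originIdx : Int) - count
      if needCount ≤ k then some (j, originIdx, needCount)
      else findSel tree position k digit (j + 1)
  else none
termination_by digit + 1 - j

def mainLoop (n : Nat) (cs : List Char) (fuel : Nat) (tree : List Int)
    (position : List (List Nat)) (i : Nat) (k : Int) (res : List Char) : List Char :=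
  match fuel with
  | 0 => res
  | fuel + 1 =>
    if i < n then
      let digit := digitAt cs i
      match (position.getD digit []).getLast? with
      | none => mainLoop n cs fuel tree position (i + 1) k res
      | some top =>
        if i < top then mainLoop n cs fuel tree position (i + 1) k res
        else
          match findSel tree position k digit 0 with
          | none => mainLoop n cs fuel tree position i k res   -- Python spins forever here
          | some (j, originIdx, needCount) =>
            mainLoop n cs fuel (updateLoop n tree (originIdx + 1) 1 (n + 1))
              (position.modify j List.dropLast) i (k - needCount)
              (res ++ [digitToChar j])
    else res

def minInteger (num : String) (k : Int) : String :=
  let cs := num.toList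
  let n := cs.length
  let tree : List Int := List.replicate (n + 1) 0
  -- for i in range(n-1, -1, -1): position[int(num[i])].append(i)   (range(n-1,-1,-1) = reversed(range(n)))
  let position := (List.range n).reverse.foldl
    (fun pos i => pos.modify (digitAt cs i) (· ++ [i])) (List.replicate 10 [])
  String.mk (mainLoop n cs (2 * n + 1) tree position 0 k [])

-- ===== PORT B =====
def bLoop (fuel : Nat) (ds : List Nat) (k : Int) (res : List Nat) : List Nat :=
  match fuel with
  | 0 => res
  | fuel + 1 =>
    if ds.isEmpty then res
    else
      let limit : Int := min k ((ds.length : Int) - 1)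
      let best : Int := (PySem.List.pyRange 1 (limit + 1) 1).foldl
        (fun b idx => if ds.getD idx.toNat 0 < ds.getD b.toNat 0 then idx else b) 0
      bLoop fuel (ds.eraseIdx best.toNat) (k - best) (res ++ [ds.getD best.toNat 0])

def minInteger_alt (num : String) (k : Int) : String :=
  -- [int(c) for c in num]: exact for ASCII digit chars (all of Pre_'s domain)
  let ds := num.toList.map (fun c => c.toNat - 48)
  -- ''.join(str(d) for d in res): each d is a single digit, str(d) = digitToChar d
  String.mk ((bLoop ds.length ds k []).map digitToChar)


-- ===== PRECONDITION & SPEC =====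
-- Pre_ excludes inputs where Python A does not return normally: any non-digit character
-- makes int(num[i]) raise ValueError (B's int(c) raises there too), and k < 0 with a
-- nonempty digit string makes A's while-loop spin forever (no digit is ever affordable).
def Pre_minInteger (num : String) (k : Int) : Prop :=
  (num.toList.all (fun c => decide ('0' ≤ c) && decide (c ≤ '9')) = true) ∧ (0 ≤ k ∨ num = "")
instance (num : String) (k : Int) : Decidable (Pre_minInteger num k) := by
  unfold Pre_minInteger; infer_instance
def pvWitness_minInteger : String × Int := ("2413", 2)

def Spec_minInteger (num : String) (k : Int) (out : String) : Prop := out = minInteger_alt num k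
instance (num : String) (k : Int) (out : String) : Decidable (Spec_minInteger num k out) := by
  unfold Spec_minInteger; infer_instance

-- ===== CLAIM (what is proved, stated in full; the proofs are below) =====
def Claim_equal_minInteger : Prop := ∀ (num : String) (k : Int), Dom_minInteger num k → Pre_minInteger num k → Spec_minInteger num k (minInteger num k)

-- ===== LEMMAS AND PROOFS =====


theorem land_two_mul (a b : Nat) : (2*a) &&& (2*b+1) = 2*(a &&& b) := by
  apply Nat.eq_of_testBit_eq
  intro i
  rw [Nat.testBit_land]
  cases i with
  | zero => simp [Nat.testBit_zero, Nat.mul_comm]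
  | succ i =>
    rw [Nat.testBit_succ, Nat.testBit_succ, Nat.testBit_succ]
    have e1 : 2*a/2 = a := by omega
    have e2 : (2*b+1)/2 = b := by omega
    have e3 : 2*(a &&& b)/2 = a &&& b := by omega
    rw [e1, e2, e3, Nat.testBit_land]
theorem land_pred_odd (m : Nat) : (2*m+1) &&& (2*m) = 2*m := by
  apply Nat.eq_of_testBit_eq
  intro i
  rw [Nat.testBit_land]
  cases i with
  | zero => simp [Nat.testBit_zero, Nat.mul_comm]
  | succ i =>
    rw [Nat.testBit_succ, Nat.testBit_succ]
    have e1 : (2*m+1)/2 = m := by omega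
    have e2 : 2*m/2 = m := by omega
    rw [e1, e2, Bool.and_self]

theorem lowbit_odd (m : Nat) : lowbit (2*m+1) = 1 := by
  unfold lowbit
  have : 2*m+1-1 = 2*m := by omega
  rw [this, land_pred_odd]; omega
theorem lowbit_even (m : Nat) (h : 0 < m) : lowbit (2*m) = 2 * lowbit m := by
  unfold lowbit
  have h1 : 2*m-1 = 2*(m-1)+1 := by omega
  rw [h1, land_two_mul]
  have h2 : m &&& (m-1) ≤ m - 1 := Nat.and_le_right
  have h3 : (m-1) = m - 1 := rfl
  omega

theorem lowbit_le {x : Nat} : lowbit x ≤ x := by unfold lowbit; omega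

def downSteps (q : Nat) : List Nat :=
  if h : 0 < q then q :: downSteps (q - lowbit q) else []
termination_by q
decreasing_by have := lowbit_pos h; omega

def upMem (p x : Nat) : Bool :=
  if hp : p = 0 then x == 0
  else if h : p < x then upMem (p + lowbit p) x else x == p
termination_by x - p
decreasing_by have := lowbit_pos (Nat.pos_of_ne_zero hp); omega

theorem downSteps_zero : downSteps 0 = [] := by unfold downSteps; simp
theorem downSteps_pos {q : Nat} (h : 0 < q) : downSteps q = q :: downSteps (q - lowbit q) := by
  rw [downSteps, dif_pos h]
theorem downSteps_even (m : Nat) : downSteps (2*m) = (downSteps m).map (2*·) := by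
  induction m using Nat.strong_induction_on with
  | _ m ih =>
    by_cases h : 0 < m
    · rw [downSteps_pos h, downSteps_pos (by omega : 0 < 2*m)]
      have e : 2*m - lowbit (2*m) = 2*(m - lowbit m) := by
        rw [lowbit_even m h]; have := lowbit_le (x := m); omega
      rw [e, ih (m - lowbit m) (by have := lowbit_pos h; omega)]
      simp
    · have : m = 0 := by omega
      subst this; simp [downSteps_zero]
theorem downSteps_odd (m : Nat) : downSteps (2*m+1) = (2*m+1) :: downSteps (2*m) := by
  rw [downSteps_pos (by omega)]
  simp [lowbit_odd]

theorem upMem_zero (x : Nat) : upMem 0 x = (x == 0) := by rw [upMem]; simp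
theorem upMem_pos_lt {p x : Nat} (hp : 0 < p) (h : p < x) :
    upMem p x = upMem (p + lowbit p) x := by
  rw [upMem, dif_neg (show ¬ p = 0 by omega), dif_pos h]
theorem upMem_pos_ge {p x : Nat} (hp : 0 < p) (h : ¬ p < x) : upMem p x = (x == p) := by
  rw [upMem, dif_neg (show ¬ p = 0 by omega), dif_neg h]

theorem upMem_le {p x : Nat} (h : upMem p x = true) : p ≤ x := by
  by_cases hp : p = 0
  · omega
  · by_cases hx : p < x
    · omega
    · rw [upMem_pos_ge (by omega) hx] at h; simp at h; omega

theorem upMem_even_even_aux : ∀ d a x, x - a = d → upMem (2*a) (2*x) = upMem a x := by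
  intro d
  induction d using Nat.strong_induction_on with
  | _ d ih =>
    intro a x hd
    by_cases hp : a = 0
    · subst hp; simp [upMem_zero]
    · by_cases h : a < x
      · rw [upMem_pos_lt (by omega) (by omega : 2*a < 2*x),
            upMem_pos_lt (by omega : 0 < a) h]
        rw [lowbit_even a (by omega), (by ring : 2*a + 2*lowbit a = 2*(a + lowbit a))]
        have hl := lowbit_pos (show 0 < a by omega)
        exact ih (x - (a + lowbit a)) (by omega) _ _ rfl
      · rw [upMem_pos_ge (by omega) (by omega : ¬ 2*a < 2*x), upMem_pos_ge (by omega) h]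
        simp

theorem upMem_even_even (a x : Nat) : upMem (2*a) (2*x) = upMem a x :=
  upMem_even_even_aux (x - a) a x rfl

theorem upMem_even_odd_aux : ∀ d a x, 2*x+1 - 2*a = d → 0 < a → upMem (2*a) (2*x+1) = false := by
  intro d
  induction d using Nat.strong_induction_on with
  | _ d ih =>
    intro a x hd ha
    by_cases h : 2*a < 2*x+1
    · rw [upMem_pos_lt (by omega) h, lowbit_even a ha,
          (by ring : 2*a + 2*lowbit a = 2*(a + lowbit a))]
      have hl := lowbit_pos ha
      exact ih (2*x+1 - 2*(a + lowbit a)) (by omega) _ _ rfl (by omega)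
    · rw [upMem_pos_ge (by omega) h]
      have h2 : 2*x+1 ≠ 2*a := by omega
      simp [h2]

theorem upMem_even_odd (a x : Nat) (ha : 0 < a) : upMem (2*a) (2*x+1) = false :=
  upMem_even_odd_aux (2*x+1 - 2*a) a x rfl ha

theorem upMem_odd (a y : Nat) :
    upMem (2*a+1) y = ((y == 2*a+1) || ((2*a+1 < y) && upMem (2*(a+1)) y)) := by
  by_cases h : 2*a+1 < y
  · rw [upMem_pos_lt (by omega) h, lowbit_odd]
    simp [h, (by ring : 2*a+1+1 = 2*(a+1))]
    intro he; omega
  · rw [upMem_pos_ge (by omega) h]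
    simp [h]

theorem upMem_odd_even (a x : Nat) :
    upMem (2*a+1) (2*x) = ((a < x) && upMem (a+1) x) := by
  rw [upMem_odd]
  have h1 : (2*x == 2*a+1) = false := by simp; omega
  rw [h1, (by ring : 2*(a+1) = 2*(a+1)), upMem_even_even (a+1) x]
  by_cases h : a < x
  · simp [h, (by omega : 2*a+1 < 2*x)]
  · have h2 : ¬ (2*a+1 < 2*x) := by omega
    simp only [Bool.false_or, h2, decide_false, Bool.false_and, h, decide_false]

theorem countCommon : ∀ q p : Nat, 1 ≤ p →
    (downSteps q).countP (fun x => upMem p x) = if p ≤ q then 1 else 0 := by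
  intro q
  induction q using Nat.strong_induction_on with
  | _ q ih =>
    intro p hp
    by_cases hq : q = 0
    · subst hq; rw [downSteps_zero]; simp; omega
    · have eodd : ∀ a : Nat, (fun x => upMem (2*a+1) ((2*·) x)) = (fun x => upMem (a+1) x) := by
        intro a
        funext x
        simp only [upMem_odd_even]
        by_cases h : a < x
        · simp [h]
        · have hf : upMem (a+1) x = false := by
            cases hu : upMem (a+1) x
            · rfl
            · have := upMem_le hu; omega
          simp [h, hf]
      rcases Nat.even_or_odd q with ⟨m, hm⟩ | ⟨m, hm⟩
      · have hm1 : 0 < m := by omega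
        subst hm
        rw [(by ring : m + m = 2*m), downSteps_even, List.countP_map]
        rcases Nat.even_or_odd p with ⟨a, ha⟩ | ⟨a, ha⟩
        · have ha1 : 0 < a := by omega
          subst ha
          rw [(by ring : a + a = 2*a)]
          simp only [Function.comp_def, upMem_even_even]
          rw [ih m (by omega) a (by omega)]
          split_ifs <;> omega
        · subst ha
          rw [(by ring : 2*a + 1 = 2*a+1)]
          simp only [Function.comp_def]
          rw [show (fun x => upMem (2*a+1) ((2*·) x)) = (fun x => upMem (a+1) x) from eodd a]
          rw [ih m (by omega) (a+1) (by omega)]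
          split_ifs <;> omega
      · subst hm
        rw [(by ring : 2*m + 1 = 2*m+1), downSteps_odd, downSteps_even, List.countP_cons, List.countP_map]
        rcases Nat.even_or_odd p with ⟨a, ha⟩ | ⟨a, ha⟩
        · have ha1 : 0 < a := by omega
          subst ha
          rw [(by ring : a + a = 2*a)]
          simp only [Function.comp_def, upMem_even_even, upMem_even_odd a m ha1]
          rw [ih m (by omega) a (by omega)]
          simp only [if_false, Bool.false_eq_true]
          split_ifs <;> omega
        · subst ha
          rw [(by ring : 2*a + 1 = 2*a+1)]
          simp only [Function.comp_def]
          rw [show (fun x => upMem (2*a+1) ((2*·) x)) = (fun x => upMem (a+1) x) from eodd a]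
          rw [ih m (by omega) (a+1) (by omega)]
          have hhead : upMem (2*a+1) (2*m+1) = (m == a) := by
            rw [upMem_odd, upMem_even_odd (a+1) m (by omega)]
            simp
          rw [hhead]
          simp only [beq_iff_eq]
          split_ifs <;> omega

theorem mem_downSteps_bounds : ∀ q y, y ∈ downSteps q → 0 < y ∧ y ≤ q := by
  intro q
  induction q using Nat.strong_induction_on with
  | _ q ih =>
    intro y hy
    by_cases h : 0 < q
    · rw [downSteps_pos h] at hy
      rcases List.mem_cons.mp hy with h1 | h1
      · omega
      · have := ih (q - lowbit q) (by have := lowbit_pos h; omega) y h1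
        omega
    · rw [(by omega : q = 0), downSteps_zero] at hy; simp at hy

theorem getSumLoop_spec : ∀ q (tree : List Int) (res : Int),
    getSumLoop tree q res = res + ((downSteps q).map (fun y => tree.getD y 0)).sum := by
  intro q
  induction q using Nat.strong_induction_on with
  | _ q ih =>
    intro tree res
    by_cases h : 0 < q
    · rw [getSumLoop, dif_pos h, downSteps_pos h,
        ih (q - lowbit q) (by have := lowbit_pos h; omega)]
      simp; ring
    · rw [getSumLoop, dif_neg h, (by omega : q = 0), downSteps_zero]
      simp

theorem getD_set (l : List Int) (i y : Nat) (v : Int) (hi : i < l.length) :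
    (l.set i v).getD y 0 = if y = i then v else l.getD y 0 := by
  simp only [List.getD_eq_getElem?_getD, List.getElem?_set]
  by_cases h : y = i
  · simp [h, hi]
  · have h2 : ¬ (i = y) := fun hh => h hh.symm
    simp [h, h2]

theorem updateLoop_spec : ∀ (fuel : Nat) (n : Nat) (tree : List Int) (i : Nat) (x : Int),
    1 ≤ i → n + 1 - i ≤ fuel → tree.length = n + 1 →
    ∀ y, (updateLoop n tree i x fuel).getD y 0
      = tree.getD y 0 + (if upMem i y && decide (y ≤ n) then x else 0) := by
  intro fuel
  induction fuel with
  | zero =>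
    intro n tree i x hi hf hl y
    have hin : ¬ i ≤ n := by omega
    have : (upMem i y && decide (y ≤ n)) = false := by
      cases hu : upMem i y
      · simp
      · have := upMem_le hu; simp; omega
    rw [updateLoop, this]
    simp
  | succ fuel ihf =>
    intro n tree i x hi hf hl y
    by_cases hin : i ≤ n
    · rw [updateLoop, if_pos hin]
      rw [ihf n _ (i + lowbit i) x (by omega) (by have := lowbit_pos (show 0 < i by omega); omega)
          (by simp [hl]) y]
      rw [getD_set tree i y _ (by omega)]
      by_cases hy : y = i
      · subst hy
        have h1 : upMem y y = true := by rw [upMem_pos_ge (by omega) (by omega)]; simp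
        have h2 : upMem (y + lowbit y) y = false := by
          cases hu : upMem (y + lowbit y) y
          · rfl
          · have := upMem_le hu; have := lowbit_pos (show 0 < y by omega); omega
        rw [if_pos rfl, h1, h2]
        simp [hin]
      · rw [if_neg hy]
        by_cases hlt : i < y
        · rw [upMem_pos_lt (by omega) hlt]
        · have h1 : upMem i y = false := by
            cases hu : upMem i y
            · rfl
            · have := upMem_le hu; omega
          have h2 : upMem (i + lowbit i) y = false := by
            cases hu : upMem (i + lowbit i) y
            · rfl
            · have := upMem_le hu; have := lowbit_pos (show 0 < i by omega); omega
          rw [h1, h2]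
    · rw [updateLoop, if_neg hin]
      have : (upMem i y && decide (y ≤ n)) = false := by
        cases hu : upMem i y
        · simp
        · have := upMem_le hu; simp; omega
      rw [this]
      simp

theorem sum_map_ite_count (l : List Nat) (p : Nat → Bool) :
    (l.map (fun y => if p y then (1:Int) else 0)).sum = (l.countP p : Int) := by
  induction l with
  | nil => simp
  | cons a l ih =>
    simp [List.countP_cons, ih]
    by_cases h : p a <;> simp [h] <;> ring

-- the getSum/update interaction, fully digested
theorem getSum_update (n : Nat) (tree : List Int) (x q : Nat)
    (hq : q ≤ n) (hl : tree.length = n + 1) :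
    getSumLoop (updateLoop n tree (x+1) 1 (n+1)) q 0
      = getSumLoop tree q 0 + (if x + 1 ≤ q then 1 else 0) := by
  rw [getSumLoop_spec, getSumLoop_spec]
  have e : ∀ y ∈ downSteps q,
      (updateLoop n tree (x+1) 1 (n+1)).getD y 0
        = tree.getD y 0 + (if upMem (x+1) y then 1 else 0) := by
    intro y hy
    rw [updateLoop_spec (n+1) n tree (x+1) 1 (by omega) (by omega) hl y]
    have hyb := mem_downSteps_bounds q y hy
    have hyn : decide (y ≤ n) = true := by simp; omega
    simp only [hyn, Bool.and_true]
  rw [List.map_congr_left e]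
  have esum : ((downSteps q).map (fun y => tree.getD y 0 + (if upMem (x+1) y then 1 else 0))).sum
      = ((downSteps q).map (fun y => tree.getD y 0)).sum
        + ((downSteps q).map (fun y => if upMem (x+1) y then (1:Int) else 0)).sum := by
    induction downSteps q with
    | nil => simp
    | cons a l ih => simp [ih]; ring
  rw [esum, sum_map_ite_count, countCommon q (x+1) (by omega)]
  split_ifs <;> simp

def remIdx (cs : List Char) (S : Finset Nat) : List Nat :=
  (List.range cs.length).filter (fun y => decide (y ∉ S))
def remDigits (cs : List Char) (S : Finset Nat) : List Nat :=
  (remIdx cs S).map (digitAt cs)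
def occ (cs : List Char) (j : Nat) (S : Finset Nat) : List Nat :=
  (List.range cs.length).filter (fun x => digitAt cs x == j && decide (x ∉ S))

theorem mem_remIdx {cs S y} : y ∈ remIdx cs S ↔ y < cs.length ∧ y ∉ S := by
  simp [remIdx]

theorem remIdx_sorted (cs S) : (remIdx cs S).Pairwise (· < ·) :=
  (List.pairwise_lt_range).filter _

theorem remIdx_nodup (cs S) : (remIdx cs S).Nodup :=
  (List.nodup_range).filter _

theorem occ_eq_filter_remIdx (cs j S) :
    occ cs j S = (remIdx cs S).filter (fun x => digitAt cs x == j) := by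
  rw [occ, remIdx, List.filter_filter]

-- index of the t-th element of a filtered range
theorem filter_range_idx : ∀ (n : Nat) (P : Nat → Bool) (t x : Nat),
    ((List.range n).filter P)[t]? = some x →
    ((List.range x).filter P).length = t := by
  intro n
  induction n with
  | zero => intro P t x h; simp at h
  | succ n ih =>
    intro P t x h
    rw [List.range_succ, List.filter_append] at h
    rcases Nat.lt_or_ge t ((List.range n).filter P).length with hlt | hge
    · rw [List.getElem?_append_left hlt] at h
      exact ih P t x h
    · rw [List.getElem?_append_right hge] at h
      by_cases hP : P n
      · simp only [List.filter_cons, hP, if_pos] at h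
        obtain ⟨h0, hxn⟩ : t - ((List.range n).filter P).length = 0 ∧ x = n := by
          cases e : t - ((List.range n).filter P).length with
          | zero => rw [e] at h; simp at h; exact ⟨rfl, h.symm⟩
          | succ m => rw [e] at h; simp at h
        subst hxn
        omega
      · simp [hP] at h

theorem card_filter_lt (S : Finset Nat) (x : Nat) :
    (S.filter (· < x)).card = ((List.range x).filter (fun y => decide (y ∈ S))).length := by
  have hnd : ((List.range x).filter (fun y => decide (y ∈ S))).Nodup :=
    (List.nodup_range).filter _
  rw [← List.toFinset_card_of_nodup hnd]
  congr 1
  ext y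
  simp [and_comm]

theorem range_filter_partition (x : Nat) (S : Finset Nat) :
    ((List.range x).filter (fun y => decide (y ∉ S))).length
      + ((List.range x).filter (fun y => decide (y ∈ S))).length = x := by
  have h0 := List.length_eq_length_filter_add (l := List.range x) (fun y => decide (y ∈ S))
  rw [List.length_range] at h0
  have e : (List.range x).filter (fun y => decide (y ∉ S)) = (List.range x).filter (fun y => !(decide (y ∈ S))) := by
    apply List.filter_congr; intro a _; simp
  rw [e]; omega

theorem remIdx_idx (cs : List Char) (S : Finset Nat) (t x : Nat)
    (h : (remIdx cs S)[t]? = some x) :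
    x < cs.length ∧ x ∉ S ∧ (S.filter (· < x)).card + t = x := by
  have hmem : x ∈ remIdx cs S := by
    have := List.mem_of_getElem? h
    exact this
  have hx := mem_remIdx.mp hmem
  have hidx := filter_range_idx cs.length _ t x h
  have hpart := range_filter_partition x S
  have hcard := card_filter_lt S x
  exact ⟨hx.1, hx.2, by omega⟩

theorem filter_lt_succ_of_not_mem (S : Finset Nat) (x : Nat) (hx : x ∉ S) :
    S.filter (· < x + 1) = S.filter (· < x) := by
  ext y
  simp only [Finset.mem_filter]
  constructor
  · rintro ⟨hy, hlt⟩
    refine ⟨hy, ?_⟩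
    rcases Nat.lt_or_ge y x with h | h
    · exact h
    · have : y = x := by omega
      subst this; exact absurd hy hx
  · rintro ⟨hy, hlt⟩; exact ⟨hy, by omega⟩

theorem remIdx_insert (cs : List Char) (S : Finset Nat) (x : Nat) :
    remIdx cs (insert x S) = (remIdx cs S).filter (fun y => !(y == x)) := by
  rw [remIdx, remIdx, List.filter_filter]
  apply List.filter_congr
  intro y _
  simp [Finset.mem_insert]
  tauto

theorem eraseIdx_eq_filter_of_nodup : ∀ (l : List Nat), l.Nodup → ∀ (t x : Nat),
    l[t]? = some x → l.eraseIdx t = l.filter (fun y => !(y == x)) := by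
  intro l
  induction l with
  | nil => intro _ t x h; simp at h
  | cons a l ih =>
    intro hnd t x h
    cases t with
    | zero =>
      simp at h
      subst h
      rw [List.eraseIdx_cons_zero, List.filter_cons]
      simp only [beq_self_eq_true, Bool.not_true, Bool.false_eq_true, if_neg, not_false_iff]
      have : ∀ y ∈ l, y ≠ a := by
        intro y hy he; subst he; exact (List.nodup_cons.mp hnd).1 hy
      rw [List.filter_eq_self.mpr]
      intro y hy; simpa using this y hy
    | succ t =>
      simp only [List.getElem?_cons_succ] at h
      have hmem : x ∈ l := List.mem_of_getElem? h
      have hax : ¬ (a == x) = true := by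
        simp; intro he; subst he; exact (List.nodup_cons.mp hnd).1 hmem
      rw [List.eraseIdx_cons_succ, List.filter_cons]
      simp only [hax, Bool.not_false]
      rw [ih (List.nodup_cons.mp hnd).2 t x h]
      simp [hax]

theorem remIdx_insert_eraseIdx (cs : List Char) (S : Finset Nat) (t x : Nat)
    (h : (remIdx cs S)[t]? = some x) :
    remIdx cs (insert x S) = (remIdx cs S).eraseIdx t := by
  rw [remIdx_insert, eraseIdx_eq_filter_of_nodup _ (remIdx_nodup cs S) t x h]

theorem remIdx_head (cs : List Char) (S : Finset Nat) (i : Nat)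
    (h1 : ∀ y, y < i → y ∈ S) (h2 : i ∉ S) (h3 : i < cs.length) :
    (remIdx cs S)[0]? = some i := by
  have hmem : i ∈ remIdx cs S := mem_remIdx.mpr ⟨h3, h2⟩
  have hne : remIdx cs S ≠ [] := by intro he; rw [he] at hmem; simp at hmem
  obtain ⟨j0, hj0⟩ : ∃ j0, (remIdx cs S)[0]? = some j0 := by
    cases hl : (remIdx cs S) with
    | nil => exact absurd hl hne
    | cons a l => exact ⟨a, by simp [hl]⟩
  have hj0mem : j0 ∈ remIdx cs S := List.mem_of_getElem? hj0
  have hj0i : i ≤ j0 := by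
    by_contra hlt
    exact (mem_remIdx.mp hj0mem).2 (h1 j0 (by omega))
  -- i occurs at some index; if that index were positive, sortedness gives j0 < i
  obtain ⟨ti, hti1, hti2⟩ := List.getElem_of_mem hmem
  cases ti with
  | zero =>
    rw [List.getElem?_eq_getElem hti1, hti2]
  | succ ti =>
    exfalso
    have hpw := List.pairwise_iff_getElem.mp (remIdx_sorted cs S)
    have h0lt : 0 < (remIdx cs S).length := by omega
    have hlt2 := hpw 0 (ti+1) h0lt hti1 (by omega)
    rw [hti2] at hlt2
    rw [List.getElem?_eq_getElem h0lt] at hj0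
    have he : (remIdx cs S)[0] = j0 := by injection hj0
    omega

theorem filter_head_index {α : Type} : ∀ (l : List α) (P : α → Bool) (x : α),
    (l.filter P).head? = some x →
    ∃ p : Nat, l[p]? = some x ∧ P x = true ∧ ∀ t : Nat, t < p → ∀ y, l[t]? = some y → ¬ P y = true := by
  intro l
  induction l with
  | nil => intro P x h; simp at h
  | cons a l ih =>
    intro P x h
    rw [List.filter_cons] at h
    by_cases hP : P a
    · simp only [hP, if_pos] at h
      simp at h
      subst h
      exact ⟨0, by simp, hP, by omega⟩
    · simp only [hP, Bool.false_eq_true, if_neg, not_false_iff] at h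
      obtain ⟨p, h1, h2, h3⟩ := ih P x h
      refine ⟨p + 1, by simpa using h1, h2, ?_⟩
      intro t ht y hy
      cases t with
      | zero => simp at hy; subst hy; simpa using hP
      | succ t => exact h3 t (by omega) y (by simpa using hy)

theorem reverse_dropLast {α : Type} (l : List α) : l.reverse.dropLast = l.tail.reverse := by
  cases l with
  | nil => simp
  | cons a l => simp [List.reverse_cons, List.dropLast_concat]

def bestSpecW (ds : List Nat) (w : Nat) (b : Nat) : Prop :=
  b ≤ w ∧ (∀ t, t ≤ w → ¬ (ds.getD t 0 < ds.getD b 0))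
    ∧ (∀ t, t < b → ds.getD b 0 < ds.getD t 0)

theorem bfold_spec (ds : List Nat) : ∀ (m : Nat),
    0 ≤ (((List.range m).map (fun t : Nat => (1:Int) + (t:Int))).foldl
      (fun (b : Int) idx => if ds.getD idx.toNat 0 < ds.getD b.toNat 0 then idx else b) 0)
    ∧ bestSpecW ds m ((((List.range m).map (fun t : Nat => (1:Int) + (t:Int))).foldl
      (fun (b : Int) idx => if ds.getD idx.toNat 0 < ds.getD b.toNat 0 then idx else b) 0).toNat) := by
  intro m
  unfold bestSpecW
  induction m with
  | zero =>
    simp only [List.range_zero, List.map_nil, List.foldl_nil, Int.toNat_zero]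
    refine ⟨le_refl _, le_refl _, ?_, ?_⟩
    · intro t ht
      have h0 : t = 0 := by omega
      subst h0
      exact lt_irrefl _
    · intro t ht
      exact absurd ht (by omega)
  | succ m ih =>
    simp only [List.range_succ, List.map_append, List.map_cons, List.map_nil, List.foldl_append]
    obtain ⟨hnn, hb, hmin, hleft⟩ := ih
    set r := (((List.range m).map (fun t : Nat => (1:Int) + (t:Int))).foldl
      (fun (b : Int) idx => if ds.getD idx.toNat 0 < ds.getD b.toNat 0 then idx else b) 0) with hr
    simp only [List.foldl_cons, List.foldl_nil]
    have htn : ((1:Int) + (m:Int)).toNat = m + 1 := by omega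
    by_cases hc : ds.getD ((1:Int) + (m:Int)).toNat 0 < ds.getD r.toNat 0
    · rw [if_pos hc]
      rw [htn] at hc
      refine ⟨by omega, by rw [htn], ?_, ?_⟩
      · intro t ht
        rw [htn]
        rcases Nat.lt_or_ge t (m+1) with h | h
        · have := hmin t (by omega)
          intro hlt
          exact this (lt_trans hlt hc)
        · have : t = m + 1 := by omega
          subst this
          exact lt_irrefl _
      · intro t ht
        rw [htn] at ht ⊢
        rcases Nat.lt_or_ge t r.toNat with h | h
        · exact lt_trans hc (hleft t h)
        · have h2 := hmin t (by omega)
          have : ds.getD r.toNat 0 ≤ ds.getD t 0 := not_lt.mp h2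
          exact lt_of_lt_of_le hc this
    · rw [if_neg hc]
      rw [htn] at hc
      refine ⟨hnn, by omega, ?_, hleft⟩
      intro t ht
      rcases Nat.lt_or_ge t (m+1) with h | h
      · exact hmin t (by omega)
      · have : t = m + 1 := by omega
        subst this
        exact hc


def dInv (cs : List Char) : Prop := ∀ c ∈ cs, 48 ≤ c.toNat ∧ c.toNat ≤ 57

theorem dInv_getD {cs : List Char} (h : dInv cs) {x : Nat} (hx : x < cs.length) :
    48 ≤ (cs.getD x ' ').toNat ∧ (cs.getD x ' ').toNat ≤ 57 := by
  rw [List.getD_eq_getElem _ _ hx]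
  exact h _ (List.getElem_mem hx)

theorem digitAt_eq {cs : List Char} {x : Nat} (hx : x < cs.length) :
    digitAt cs x = (cs.getD x ' ').toNat - 48 := by
  rw [digitAt, List.getD_eq_getElem _ _ hx, List.getD_eq_getElem _ _ hx]

theorem digitAt_lt {cs : List Char} (h : dInv cs) {x : Nat} (hx : x < cs.length) :
    digitAt cs x < 10 := by
  have := dInv_getD h hx
  rw [digitAt_eq hx]; omega

theorem mem_occ {cs j S y} : y ∈ occ cs j S ↔ y < cs.length ∧ digitAt cs y = j ∧ y ∉ S := by
  simp [occ]

theorem occ_nodup (cs j S) : (occ cs j S).Nodup := (List.nodup_range).filter _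

theorem remDigits_getD (cs : List Char) (S : Finset Nat) (t x : Nat)
    (h : (remIdx cs S)[t]? = some x) :
    (remDigits cs S).getD t 0 = digitAt cs x := by
  rw [remDigits, List.getD_eq_getElem?_getD, List.getElem?_map, h]
  rfl

theorem remDigits_length (cs S) : (remDigits cs S).length = (remIdx cs S).length := by
  rw [remDigits, List.length_map]

-- the position-building fold
theorem build_fold (cs : List Char) : ∀ (L : List Nat) (pos : List (List Nat)),
    pos.length = 10 → ∀ j, j < 10 →
    (L.foldl (fun pos i => pos.modify (digitAt cs i) (· ++ [i])) pos).getD j []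
      = pos.getD j [] ++ (L.filter (fun i => digitAt cs i == j)) := by
  intro L
  induction L with
  | nil => intro pos _ j _; simp
  | cons a L ih =>
    intro pos hlen j hj
    rw [List.foldl_cons, ih _ (by rw [List.length_modify]; exact hlen) j hj, List.filter_cons]
    by_cases hd : digitAt cs a = j
    · have hjl : j < pos.length := by omega
      rw [List.getD_eq_getElem?_getD,
        show (pos.modify (digitAt cs a) (· ++ [a]))[j]? = (· ++ [a]) <$> pos[j]? from by
          rw [hd]; exact List.getElem?_modify_eq _ _ _,
        List.getElem?_eq_getElem hjl]
      simp only [hd, beq_self_eq_true, if_pos, Option.map_some]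
      rw [List.getD_eq_getElem _ _ hjl]
      simp [List.append_assoc]
    · have : ¬ (digitAt cs a == j) = true := by simp [hd]
      rw [List.getD_eq_getElem?_getD, List.getElem?_modify_ne _ _ hd]
      simp only [this, Bool.false_eq_true, if_neg, not_false_iff, List.append_nil]
      rw [List.getD_eq_getElem?_getD]

theorem findSel_none_step (tree : List Int) (position : List (List Nat)) (k : Int) (digit j : Nat) (hj : j ≤ digit)
    (hs : (position.getD j []).getLast? = none) :
    findSel tree position k digit j = findSel tree position k digit (j+1) := by
  rw [findSel, if_pos hj]
  simp only [hs]

theorem findSel_hit (tree : List Int) (position : List (List Nat)) (k : Int) (digit j x : Nat) (hj : j ≤ digit)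
    (hs : (position.getD j []).getLast? = some x)
    (hc : (x:Int) - getSumLoop tree (x+1) 0 ≤ k) :
    findSel tree position k digit j = some (j, x, (x:Int) - getSumLoop tree (x+1) 0) := by
  rw [findSel, if_pos hj]
  simp only [hs, hc, if_pos]

theorem findSel_miss (tree : List Int) (position : List (List Nat)) (k : Int) (digit j x : Nat) (hj : j ≤ digit)
    (hs : (position.getD j []).getLast? = some x)
    (hc : ¬ ((x:Int) - getSumLoop tree (x+1) 0 ≤ k)) :
    findSel tree position k digit j = findSel tree position k digit (j+1) := by
  rw [findSel, if_pos hj]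
  simp only [hs, hc, if_neg, not_false_iff]

-- needCount of the first remaining occurrence equals its index in the remaining list
theorem needCount_eq (cs : List Char) (S : Finset Nat) (tree : List Int) (t y : Nat)
    (htree : ∀ q, q ≤ cs.length → getSumLoop tree q 0 = ((S.filter (· < q)).card : Int))
    (hy : (remIdx cs S)[t]? = some y) :
    (y:Int) - getSumLoop tree (y+1) 0 = (t:Int) := by
  obtain ⟨hyn, hyS, hcard⟩ := remIdx_idx cs S t y hy
  rw [htree (y+1) (by omega), filter_lt_succ_of_not_mem S y hyS]
  have : ((S.filter (· < y)).card : Int) = (y:Int) - (t:Int) := by omega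
  rw [this]
  ring

theorem findSel_spec
    (cs : List Char) (S : Finset Nat) (tree : List Int) (position : List (List Nat)) (k : Int)
    (hdig : dInv cs)
    (htree : ∀ q, q ≤ cs.length → getSumLoop tree q 0 = ((S.filter (· < q)).card : Int))
    (hpos : ∀ j, j < 10 → position.getD j [] = (occ cs j S).reverse)
    (w p : Nat)
    (hbest : bestSpecW (remDigits cs S) w p)
    (hw2 : ∀ t : Nat, t ≤ w → (t:Int) ≤ k)
    (hwk : ∀ t : Nat, t < (remIdx cs S).length → w < t → k < (t:Int))
    (i : Nat) (hhead : (remIdx cs S)[0]? = some i)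
    (x : Nat) (hx : (remIdx cs S)[p]? = some x) :
    (occ cs (digitAt cs x) S).head? = some x ∧
      findSel tree position k (digitAt cs i) 0 = some (digitAt cs x, x, (p:Int)) := by
  obtain ⟨hxn, hxS, hxcard⟩ := remIdx_idx cs S p x hx
  obtain ⟨hin, hiS, hicard⟩ := remIdx_idx cs S 0 i hhead
  have hvd : digitAt cs x ≤ digitAt cs i := by
    have h0 := hbest.2.1 0 (by omega)
    rw [remDigits_getD cs S 0 i hhead, remDigits_getD cs S p x hx] at h0
    omega
  have hocc : (occ cs (digitAt cs x) S).head? = some x := by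
    have hxmem : x ∈ occ cs (digitAt cs x) S := mem_occ.mpr ⟨hxn, rfl, hxS⟩
    cases hl : (occ cs (digitAt cs x) S).head? with
    | none =>
      rw [List.head?_eq_none_iff] at hl
      rw [hl] at hxmem; simp at hxmem
    | some x₀ =>
      have hh : ((remIdx cs S).filter (fun y => digitAt cs y == digitAt cs x)).head? = some x₀ := by
        rw [← occ_eq_filter_remIdx]; exact hl
      obtain ⟨p₀, hp₀, hP₀, hfirst⟩ := filter_head_index _ _ _ hh
      have hp₀le : p₀ ≤ p := by
        by_contra hgt
        exact (hfirst p (by omega) x hx) (by simp)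
      have hnotlt : ¬ p₀ < p := by
        intro hlt
        have hstrict := hbest.2.2 p₀ hlt
        have hd₀ : digitAt cs x₀ = digitAt cs x := by simpa using hP₀
        rw [remDigits_getD _ _ _ _ hp₀, remDigits_getD _ _ _ _ hx] at hstrict
        omega
      have : p₀ = p := by omega
      subst this
      rw [hp₀] at hx
      injection hx with he
      rw [he]
  refine ⟨hocc, ?_⟩
  have hv10 : digitAt cs x < 10 := digitAt_lt hdig hxn
  have main : ∀ m j, digitAt cs x - j = m → j ≤ digitAt cs x →
      findSel tree position k (digitAt cs i) j = some (digitAt cs x, x, (p:Int)) := by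
    intro m
    induction m with
    | zero =>
      intro j h1 h2
      have hjv : j = digitAt cs x := by omega
      rw [hjv]
      have hstack : (position.getD (digitAt cs x) []).getLast? = some x := by
        rw [hpos _ hv10, List.getLast?_reverse, hocc]
      have hneed : (x:Int) - getSumLoop tree (x+1) 0 = (p:Int) :=
        needCount_eq cs S tree p x htree hx
      rw [findSel_hit tree position k _ _ x hvd hstack
        (by rw [hneed]; exact hw2 p hbest.1)]
      rw [hneed]
    | succ m ih =>
      intro j h1 h2
      have hjv : j < digitAt cs x := by omega
      have hjd : j ≤ digitAt cs i := by omega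
      have hj10 : j < 10 := by omega
      cases hl : (occ cs j S).head? with
      | none =>
        have hstack : (position.getD j []).getLast? = none := by
          rw [hpos j hj10, List.getLast?_reverse, hl]
        rw [findSel_none_step _ _ _ _ _ hjd hstack]
        exact ih (j+1) (by omega) (by omega)
      | some y =>
        have hh : ((remIdx cs S).filter (fun z => digitAt cs z == j)).head? = some y := by
          rw [← occ_eq_filter_remIdx]; exact hl
        obtain ⟨pj, hpj, hPj, hfirstj⟩ := filter_head_index _ _ _ hh
        obtain ⟨hyn, hyS, hycard⟩ := remIdx_idx cs S pj y hpj
        have hpjl : pj < (remIdx cs S).length := by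
          obtain ⟨hlt, _⟩ := List.getElem?_eq_some_iff.mp hpj
          exact hlt
        have hpjw : w < pj := by
          by_contra hle
          have hmin := hbest.2.1 pj (by omega)
          rw [remDigits_getD _ _ _ _ hpj, remDigits_getD _ _ _ _ hx] at hmin
          have hdy : digitAt cs y = j := by simpa using hPj
          omega
        have hky := hwk pj hpjl hpjw
        have hstack : (position.getD j []).getLast? = some y := by
          rw [hpos j hj10, List.getLast?_reverse, hl]
        have hneed := needCount_eq cs S tree pj y htree hpj
        rw [findSel_miss _ _ _ _ _ y hjd hstack (by rw [hneed]; omega)]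
        exact ih (j+1) (by omega) (by omega)
  exact main (digitAt cs x) 0 rfl (by omega)

theorem bLoop_acc : ∀ (fuel : Nat) (ds : List Nat) (k : Int) (res : List Nat),
    bLoop fuel ds k res = res ++ bLoop fuel ds k [] := by
  intro fuel
  induction fuel with
  | zero => intro ds k res; simp [bLoop]
  | succ fuel ih =>
    intro ds k res
    rw [bLoop, bLoop]
    by_cases he : ds.isEmpty
    · simp [he]
    · simp only [he, Bool.false_eq_true, if_neg, not_false_iff]
      rw [ih _ _ (res ++ _), ih _ _ ([] ++ _)]
      simp

theorem updateLoop_length : ∀ (fuel n : Nat) (tree : List Int) (i : Nat) (x : Int),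
    (updateLoop n tree i x fuel).length = tree.length := by
  intro fuel
  induction fuel with
  | zero => intro n tree i x; rfl
  | succ fuel ih =>
    intro n tree i x
    rw [updateLoop]
    by_cases h : i ≤ n
    · rw [if_pos h, ih]; simp
    · rw [if_neg h]

theorem pyRange_fold_bridge (limit : Int) (hl : 0 ≤ limit) (ds : List Nat) :
    (PySem.List.pyRange 1 (limit + 1) 1).foldl
        (fun (b : Int) idx => if ds.getD idx.toNat 0 < ds.getD b.toNat 0 then idx else b) 0
      = ((List.range limit.toNat).map (fun t : Nat => (1:Int) + (t:Int))).foldl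
        (fun (b : Int) idx => if ds.getD idx.toNat 0 < ds.getD b.toNat 0 then idx else b) 0 := by
  rw [PySem.List.pyRange_one]
  have : (limit + 1 - 1).toNat = limit.toNat := by omega
  rw [this]

-- occ after inserting the selected position
theorem occ_insert_ne (cs : List Char) (S : Finset Nat) (x j : Nat)
    (hne : digitAt cs x ≠ j) : occ cs j (insert x S) = occ cs j S := by
  apply List.filter_congr
  intro y _
  by_cases hyx : y = x
  · subst hyx
    have : ¬ (digitAt cs y == j) = true := by simp [hne]
    simp [this]
  · simp [Finset.mem_insert, hyx]

theorem occ_insert_self (cs : List Char) (S : Finset Nat) (x : Nat)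
    (hhead : (occ cs (digitAt cs x) S).head? = some x) :
    occ cs (digitAt cs x) (insert x S) = (occ cs (digitAt cs x) S).tail := by
  have he : occ cs (digitAt cs x) (insert x S)
      = (occ cs (digitAt cs x) S).filter (fun y => !(y == x)) := by
    rw [occ, occ, List.filter_filter]
    apply List.filter_congr
    intro y _
    by_cases hyx : y = x
    · subst hyx; simp
    · simp [Finset.mem_insert, hyx]
  rw [he]
  have h0 : (occ cs (digitAt cs x) S)[0]? = some x := by
    rw [← List.head?_eq_getElem?]; exact hhead
  rw [← eraseIdx_eq_filter_of_nodup _ (occ_nodup cs _ S) 0 x h0, List.eraseIdx_zero]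

theorem remIdx_empty_of_full (cs : List Char) (S : Finset Nat)
    (h : ∀ y, y < cs.length → y ∈ S) : remIdx cs S = [] := by
  rw [remIdx, List.filter_eq_nil_iff]
  intro y hy
  simp only [decide_eq_true_eq]
  intro hns
  exact hns (h y (by simpa using hy))

def bestExpr (ds : List Nat) (k : Int) : Int :=
  (PySem.List.pyRange 1 (min k ((ds.length:Int) - 1) + 1) 1).foldl
    (fun (b : Int) idx => if ds.getD idx.toNat 0 < ds.getD b.toNat 0 then idx else b) 0

theorem bLoop_step (m : Nat) (ds : List Nat) (k : Int) (hne : ds ≠ []) :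
    bLoop (m+1) ds k []
      = [ds.getD (bestExpr ds k).toNat 0]
          ++ bLoop m (ds.eraseIdx (bestExpr ds k).toNat) (k - bestExpr ds k) [] := by
  rw [bLoop]
  have hie : ds.isEmpty = false := by
    cases ds
    · exact absurd rfl hne
    · rfl
  rw [hie]
  simp only [Bool.false_eq_true, if_neg, not_false_iff]
  simp only [List.nil_append]
  rw [bLoop_acc]
  rfl

theorem main_sim (cs : List Char) (hdig : dInv cs) :
    ∀ (fuel : Nat) (S : Finset Nat) (tree : List Int) (position : List (List Nat))
      (i : Nat) (k : Int) (res : List Char),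
    0 ≤ k →
    i ≤ cs.length →
    (∀ y, y < i → y ∈ S) →
    (∀ y ∈ S, y < cs.length) →
    tree.length = cs.length + 1 →
    (∀ q, q ≤ cs.length → getSumLoop tree q 0 = ((S.filter (· < q)).card : Int)) →
    position.length = 10 →
    (∀ j, j < 10 → position.getD j [] = (occ cs j S).reverse) →
    cs.length - i + (remIdx cs S).length + 1 ≤ fuel →
    mainLoop cs.length cs fuel tree position i k res
      = res ++ (bLoop (remIdx cs S).length (remDigits cs S) k []).map digitToChar := by
  intro fuel
  induction fuel with
  | zero =>
    intro S tree position i k res _ _ _ _ _ _ _ _ hf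
    omega
  | succ fuel ih =>
    intro S tree position i k res hk hi hlow hSn htlen htree hplen hpos hfuel
    by_cases hin : i < cs.length
    · have hd10 : digitAt cs i < 10 := digitAt_lt hdig hin
      by_cases hiS : i ∈ S
      · -- skip branch: position i was already taken
        have hskip : mainLoop cs.length cs (fuel+1) tree position i k res
            = mainLoop cs.length cs fuel tree position (i+1) k res := by
          rw [mainLoop]
          rw [if_pos hin]
          cases hl : (occ cs (digitAt cs i) S).head? with
          | none =>
            have hstack : (position.getD (digitAt cs i) []).getLast? = none := by
              rw [hpos _ hd10, List.getLast?_reverse, hl]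
            simp only [hstack]
          | some t =>
            have hstack : (position.getD (digitAt cs i) []).getLast? = some t := by
              rw [hpos _ hd10, List.getLast?_reverse, hl]
            simp only [hstack]
            have htm : t ∈ occ cs (digitAt cs i) S := List.mem_of_mem_head? (by rw [hl]; rfl)
            have htS : t ∉ S := (mem_occ.mp htm).2.2
            have hti : i < t := by
              rcases Nat.lt_trichotomy t i with h | h | h
              · exact absurd (hlow t h) htS
              · subst h; exact absurd hiS htS
              · exact h
            rw [if_pos hti]
        rw [hskip, ih S tree position (i+1) k res hk (by omega)
          (by intro y hy; rcases Nat.lt_or_ge y i with h | h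
              · exact hlow y h
              · have : y = i := by omega
                subst this; exact hiS)
          hSn htlen htree hplen hpos (by omega)]
      · -- selection step
        have hhead := remIdx_head cs S i hlow hiS hin
        have hl0 : 0 < (remIdx cs S).length := by
          obtain ⟨h, _⟩ := List.getElem?_eq_some_iff.mp hhead; omega
        have hdsl : (remDigits cs S).length = (remIdx cs S).length := remDigits_length cs S
        have hdsne : remDigits cs S ≠ [] := by
          intro he; rw [he] at hdsl; simp at hdsl; omega
        have hlim0 : (0:Int) ≤ min k (((remDigits cs S).length : Int) - 1) := by
          rw [hdsl]; omega
        have hbr := pyRange_fold_bridge _ hlim0 (remDigits cs S)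
        obtain ⟨hbnn, hbspec⟩ := bfold_spec (remDigits cs S) (min k (((remDigits cs S).length : Int) - 1)).toNat
        have hrfold : bestExpr (remDigits cs S) k
            = ((List.range (min k (((remDigits cs S).length : Int) - 1)).toNat).map
                (fun t : Nat => (1:Int)+(t:Int))).foldl
              (fun (b : Int) idx => if (remDigits cs S).getD idx.toNat 0 < (remDigits cs S).getD b.toNat 0 then idx else b) 0 := by
          rw [bestExpr, hbr]
        have hrnn : 0 ≤ bestExpr (remDigits cs S) k := by rw [hrfold]; exact hbnn
        have hbspec' : bestSpecW (remDigits cs S) (min k (((remDigits cs S).length : Int) - 1)).toNat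
            (bestExpr (remDigits cs S) k).toNat := by rw [hrfold]; exact hbspec
        have hplimit := hbspec'.1
        have hwl : ((min k (((remDigits cs S).length : Int) - 1)).toNat : Int)
            = min k (((remDigits cs S).length : Int) - 1) := Int.toNat_of_nonneg hlim0
        have hminr : min k (((remDigits cs S).length : Int) - 1) ≤ ((remDigits cs S).length : Int) - 1 :=
          min_le_right _ _
        have hminl : min k (((remDigits cs S).length : Int) - 1) ≤ k := min_le_left _ _
        have hpl : (bestExpr (remDigits cs S) k).toNat < (remIdx cs S).length := by omega
        obtain ⟨x, hx⟩ : ∃ x, (remIdx cs S)[(bestExpr (remDigits cs S) k).toNat]? = some x :=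
          ⟨_, List.getElem?_eq_getElem hpl⟩
        obtain ⟨hxn, hxS, hxcard⟩ := remIdx_idx cs S _ x hx
        have hv10 : digitAt cs x < 10 := digitAt_lt hdig hxn
        have hw2 : ∀ t : Nat, t ≤ (min k (((remDigits cs S).length : Int) - 1)).toNat → (t:Int) ≤ k := by
          intro t ht; omega
        have hwk : ∀ t : Nat, t < (remIdx cs S).length →
            (min k (((remDigits cs S).length : Int) - 1)).toNat < t → k < (t:Int) := by
          intro t htl hwt
          rcases min_choice k (((remDigits cs S).length : Int) - 1) with he | he <;> omega
        obtain ⟨hocc, hfind⟩ := findSel_spec cs S tree position k hdig htree hpos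
          (min k (((remDigits cs S).length : Int) - 1)).toNat (bestExpr (remDigits cs S) k).toNat
          hbspec' hw2 hwk i hhead x hx
        have hkp : ((bestExpr (remDigits cs S) k).toNat : Int) ≤ k := hw2 _ hplimit
        have hoccd : (occ cs (digitAt cs i) S).head? = some i := by
          cases hrem : remIdx cs S with
          | nil => rw [hrem] at hhead; simp at hhead
          | cons a rest =>
            rw [hrem] at hhead
            simp at hhead
            subst hhead
            rw [occ_eq_filter_remIdx, hrem, List.filter_cons]
            simp
        have hstack : (position.getD (digitAt cs i) []).getLast? = some i := by
          rw [hpos _ hd10, List.getLast?_reverse, hoccd]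
        have hA : mainLoop cs.length cs (fuel+1) tree position i k res
            = mainLoop cs.length cs fuel
                (updateLoop cs.length tree (x+1) 1 (cs.length+1))
                (position.modify (digitAt cs x) List.dropLast) i
                (k - ((bestExpr (remDigits cs S) k).toNat : Int))
                (res ++ [digitToChar (digitAt cs x)]) := by
          rw [mainLoop, if_pos hin]
          simp only [hstack]
          rw [if_neg (lt_irrefl i)]
          simp only [hfind]
        rw [hA]
        have hIH := ih (insert x S) (updateLoop cs.length tree (x+1) 1 (cs.length+1))
          (position.modify (digitAt cs x) List.dropLast) i
          (k - ((bestExpr (remDigits cs S) k).toNat : Int))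
          (res ++ [digitToChar (digitAt cs x)])
          (by omega)
          hi
          (fun y hy => Finset.mem_insert_of_mem (hlow y hy))
          (by intro y hy
              rcases Finset.mem_insert.mp hy with h | h
              · subst h; exact hxn
              · exact hSn y h)
          (by rw [updateLoop_length]; exact htlen)
          (by intro q hq
              rw [getSum_update cs.length tree x q hq htlen, htree q hq, Finset.filter_insert]
              by_cases hxq : x < q
              · rw [if_pos hxq, Finset.card_insert_of_notMem (by simp [hxS])]
                rw [if_pos (by omega : x + 1 ≤ q)]
                push_cast
                ring
              · rw [if_neg hxq, if_neg (by omega : ¬ (x + 1 ≤ q))]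
                ring)
          (by rw [List.length_modify]; exact hplen)
          (by intro j hj
              by_cases hjv : j = digitAt cs x
              · rw [hjv]
                rw [List.getD_eq_getElem?_getD, List.getElem?_modify_eq,
                  List.getElem?_eq_getElem (show digitAt cs x < position.length by omega)]
                have hpg : position[digitAt cs x] = position.getD (digitAt cs x) [] :=
                  (List.getD_eq_getElem _ _ (show digitAt cs x < position.length by omega)).symm
                rw [Option.map_eq_map, Option.map_some, Option.getD_some, hpg, hpos _ hv10,
                  reverse_dropLast, occ_insert_self cs S x hocc]
              · rw [List.getD_eq_getElem?_getD,
                  List.getElem?_modify_ne _ _ (show digitAt cs x ≠ j from fun he => hjv he.symm),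
                  ← List.getD_eq_getElem?_getD, hpos j hj,
                  occ_insert_ne cs S x j (show digitAt cs x ≠ j from fun he => hjv he.symm)])
          (by rw [remIdx_insert_eraseIdx cs S _ x hx, List.length_eraseIdx_of_lt hpl]
              omega)
        rw [hIH]
        have hBchars : remDigits cs (insert x S) = (remDigits cs S).eraseIdx (bestExpr (remDigits cs S) k).toNat := by
          rw [remDigits, remIdx_insert_eraseIdx cs S _ x hx, ← List.eraseIdx_map]
          rfl
        have hBlen : (remIdx cs (insert x S)).length = (remIdx cs S).length - 1 := by
          rw [remIdx_insert_eraseIdx cs S _ x hx, List.length_eraseIdx_of_lt hpl]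
        rw [hBchars, hBlen]
        obtain ⟨m, hm⟩ : ∃ m, (remIdx cs S).length = m + 1 := ⟨(remIdx cs S).length - 1, by omega⟩
        rw [show (remIdx cs S).length = m + 1 from hm]
        rw [bLoop_step m (remDigits cs S) k hdsne]
        have hrp : bestExpr (remDigits cs S) k = ((bestExpr (remDigits cs S) k).toNat : Int) :=
          (Int.toNat_of_nonneg hrnn).symm
        have hdg : (remDigits cs S).getD (bestExpr (remDigits cs S) k).toNat 0
            = digitAt cs x := remDigits_getD cs S _ x hx
        rw [hdg, ← hrp, show m = m + 1 - 1 from rfl, ← hm]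
        simp [hm]
    · -- i = cs.length : all positions consumed
      have hieq : ∀ y, y < cs.length → y ∈ S := by
        intro y hy; exact hlow y (by omega)
      have hre : remIdx cs S = [] := remIdx_empty_of_full cs S hieq
      rw [mainLoop, if_neg hin, hre]
      simp [bLoop, remDigits, hre]

theorem getD_replicate_zero (n y : Nat) : (List.replicate n (0:Int)).getD y 0 = 0 := by
  rw [List.getD_eq_getElem?_getD]
  rcases Nat.lt_or_ge y n with h | h
  · rw [List.getElem?_eq_getElem (by simpa using h)]
    simp
  · rw [List.getElem?_eq_none (by simpa using h)]
    rfl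

theorem tree0_spec (n q : Nat) : getSumLoop (List.replicate (n+1) (0:Int)) q 0 = 0 := by
  rw [getSumLoop_spec]
  have : ∀ y ∈ downSteps q, (List.replicate (n+1) (0:Int)).getD y 0 = (fun _ => (0:Int)) y := by
    intro y _; exact getD_replicate_zero _ _
  rw [List.map_congr_left this]
  simp

theorem build_fold_length (cs : List Char) : ∀ (L : List Nat) (pos : List (List Nat)),
    (L.foldl (fun pos i => pos.modify (digitAt cs i) (· ++ [i])) pos).length = pos.length := by
  intro L
  induction L with
  | nil => intro pos; rfl
  | cons a L ih => intro pos; rw [List.foldl_cons, ih, List.length_modify]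

theorem remIdx_empty (cs : List Char) : remIdx cs ∅ = List.range cs.length := by
  rw [remIdx]
  apply List.filter_eq_self.mpr
  intro y _
  simp

theorem remDigits_empty (cs : List Char) :
    remDigits cs ∅ = cs.map (fun c => c.toNat - 48) := by
  rw [remDigits, remIdx_empty]
  apply List.ext_getElem
  · simp
  · intro i h1 h2
    simp only [List.getElem_map, List.getElem_range]
    rw [digitAt, List.getD_eq_getElem _ _ (by simpa using h2)]

theorem occ_empty (cs : List Char) (j : Nat) :
    occ cs j ∅ = (List.range cs.length).filter (fun i => digitAt cs i == j) := by
  rw [occ]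
  apply List.filter_congr
  intro y _
  simp

theorem pos0_spec (cs : List Char) (j : Nat) (hj : j < 10) :
    ((List.range cs.length).reverse.foldl
        (fun pos i => pos.modify (digitAt cs i) (· ++ [i])) (List.replicate 10 [])).getD j []
      = (occ cs j ∅).reverse := by
  rw [build_fold cs _ _ (by simp) j hj, List.filter_reverse, occ_empty]
  have : (List.replicate 10 ([] : List Nat)).getD j [] = [] := by
    rw [List.getD_eq_getElem _ _ (by simpa using hj), List.getElem_replicate]
  rw [this]
  rfl

theorem pre_dInv {num : String}
    (h : num.toList.all (fun c => decide ('0' ≤ c) && decide (c ≤ '9')) = true) :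
    dInv num.toList := by
  intro c hc
  have := List.all_eq_true.mp h c hc
  simp only [Bool.and_eq_true, decide_eq_true_eq] at this
  exact ⟨this.1, this.2⟩

theorem minInteger_eq_alt (num : String) (k : Int) (hpre : Pre_minInteger num k) :
    minInteger num k = minInteger_alt num k := by
  by_cases hnil : num.toList = []
  · rw [minInteger, minInteger_alt, hnil]
    rfl
  · have hk : 0 ≤ k := by
      rcases hpre.2 with h | h
      · exact h
      · exfalso; rw [h] at hnil; exact hnil rfl
    have hdig : dInv num.toList := pre_dInv hpre.1
    rw [minInteger, minInteger_alt]
    congr 1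
    rw [main_sim num.toList hdig (2 * num.toList.length + 1) ∅
      (List.replicate (num.toList.length + 1) 0)
      ((List.range num.toList.length).reverse.foldl
        (fun pos i => pos.modify (digitAt num.toList i) (· ++ [i])) (List.replicate 10 []))
      0 k [] hk (by omega) (by omega) (by simp)
      (by simp)
      (by intro q hq; rw [tree0_spec]; simp)
      (by rw [build_fold_length]; simp)
      (fun j hj => pos0_spec num.toList j hj)
      (by rw [remIdx_empty]; simp; omega)]
    rw [remIdx_empty, remDigits_empty, List.length_range]
    simp

-- ===== VERDICT (by name: the statement is the Claim_ definition above) =====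
theorem minInteger_spec : Claim_equal_minInteger := by
  intro num k _ hpre
  unfold Spec_minInteger
  exact minInteger_eq_alt num k hpre
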